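-- pv_equiv track=rewrite | github.com/liu-bluesky/AI-Native | web-admin/api/stores/json/system_config_store.py | _normalize_global_assistant_guide_module_id
-- ===== SOURCE A (Python) =====
-- def _normalize_global_assistant_guide_module_id(raw_value: object, fallback: str) -> str:
--     text = str(raw_value or "").strip().lower()[:80]
--     for source, target in (
--         (" ", "-"),
--         ("/", "-"),
--         ("\\", "-"),
--         (".", "-"),
--         (":", "-"),
--     ):
--         text = text.replace(source, target)
--     while "--" in text:
--         text = text.replace("--", "-")
--     text = text.strip("-_")
--     if text:
--         return text
--     return fallback
-- ===== SOURCE B (Python) =====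
-- def _normalize_global_assistant_guide_module_id(raw_value: object, fallback: str) -> str:
--     text = str(raw_value or "").strip().lower()[:80]
--     out = []
--     for ch in text:
--         if ch in " /\\.:":
--             ch = "-"
--         if ch == "-" and out and out[-1] == "-":
--             continue
--         out.append(ch)
--     result = "".join(out).strip("-_")
--     return result if result else fallback
-- ===== Notes on version B (the rewrite author's own statement) =====
-- stated objective: alternative
-- what changed: Replaced A's five sequential str.replace passes plus a repeated '--'-collapse while-loop with a single stateful left-to-right scan that maps separator characters to '-' and skips a '-' whenever the previously emitted character is already '-'.
import Mathlib
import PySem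

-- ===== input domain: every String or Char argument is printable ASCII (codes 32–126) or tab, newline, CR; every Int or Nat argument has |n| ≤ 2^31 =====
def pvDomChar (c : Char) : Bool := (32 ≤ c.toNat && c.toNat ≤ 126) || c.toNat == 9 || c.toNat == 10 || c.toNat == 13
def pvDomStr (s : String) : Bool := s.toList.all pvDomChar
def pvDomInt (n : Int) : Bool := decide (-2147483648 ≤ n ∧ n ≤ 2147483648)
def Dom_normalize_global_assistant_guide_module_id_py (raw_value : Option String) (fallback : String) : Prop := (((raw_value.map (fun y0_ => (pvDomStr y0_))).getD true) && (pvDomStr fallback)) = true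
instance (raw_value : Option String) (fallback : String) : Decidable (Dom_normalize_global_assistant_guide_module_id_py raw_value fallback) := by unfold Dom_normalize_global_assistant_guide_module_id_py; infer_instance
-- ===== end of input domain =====

-- B replaces A's five-pass replace chain plus repeated '--'-collapse loop by a single
-- stateful left-to-right scan (map each separator to '-', skip a '-' whose predecessor in
-- the output is already '-'); objective: alternative single-pass decomposition, same result.

-- ===== PORT A =====
-- pvRep is one left-to-right pass of Python's text.replace("--", "-"); it exists to state
-- the termination measure of A's while-loop (pvReplace_dd_len_lt, cited in decreasing_by).
def pvRep : List Char → List Char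
  | '-' :: '-' :: cs => '-' :: pvRep cs
  | c :: cs => c :: pvRep cs
  | [] => []

theorem pvRep_cons_ne (c : Char) (cs : List Char) (h : c ≠ '-') : pvRep (c :: cs) = c :: pvRep cs := by
  rw [pvRep.eq_def]; split <;> simp_all

theorem pvRep_dash_cons (c : Char) (cs : List Char) (h : c ≠ '-') :
    pvRep ('-' :: c :: cs) = '-' :: pvRep (c :: cs) := by
  rw [pvRep.eq_def]; split <;> simp_all [eq_comm]

theorem pvGo_dd (fuel : Nat) (l acc : List Char) (h : l.length ≤ fuel) :
    PySem.Chars.replace.go ['-','-'] ['-'] fuel l acc = acc.reverse ++ pvRep l := by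
  induction fuel generalizing l acc with
  | zero =>
    have : l = [] := by cases l <;> simp_all
    subst this; simp [PySem.Chars.replace.go, pvRep]
  | succ n ih =>
    rcases l with _ | ⟨c, t⟩
    · simp [PySem.Chars.replace.go, pvRep]
    · rw [PySem.Chars.replace.go]
      by_cases hp : (['-','-'].isPrefixOf (c :: t)) = true
      · rw [if_pos hp]
        rcases t with _ | ⟨d, t⟩
        · simp [List.isPrefixOf] at hp
        · simp [List.isPrefixOf] at hp
          obtain ⟨rfl, rfl⟩ := hp
          rw [ih _ _ (by simp at h ⊢; omega)]
          simp [pvRep]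
      · simp only [if_neg hp]
        rw [ih _ _ (by simp at h ⊢; omega)]
        have hc : ¬ (c = '-' ∧ t.head? = some '-') := by
          rintro ⟨rfl, hd⟩
          rcases t with _ | ⟨d, t⟩ <;> simp_all [List.isPrefixOf]
        rcases t with _ | ⟨d, t⟩
        · by_cases hc' : c = '-'
          · subst hc'; simp [pvRep]
          · rw [pvRep_cons_ne _ _ hc']; simp
        · by_cases hc' : c = '-'
          · subst hc'
            have hd : d ≠ '-' := by intro hd; exact hc ⟨rfl, by simp [hd]⟩
            rw [pvRep_dash_cons _ _ hd]; simp
          · rw [pvRep_cons_ne _ _ hc']; simp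

theorem pvReplace_dd (cs : List Char) : PySem.Chars.replace cs ['-','-'] ['-'] = pvRep cs := by
  rw [PySem.Chars.replace, if_neg (by decide)]
  simpa using pvGo_dd cs.length cs [] le_rfl

theorem pvRep_len_le (cs : List Char) : (pvRep cs).length ≤ cs.length := by
  fun_induction pvRep cs <;> simp_all <;> omega

theorem pvRep_len_lt (cs : List Char) (h : ['-','-'] <:+: cs) : (pvRep cs).length < cs.length := by
  fun_induction pvRep cs with
  | case1 t ih =>
    have := pvRep_len_le t
    simp only [List.length_cons]; omega
  | case2 c t hne ih =>
    rcases (List.infix_cons_iff.mp h) with hpre | hinf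
    · exfalso
      obtain ⟨hc, hpre2⟩ := List.cons_prefix_cons.mp hpre
      rcases t with _ | ⟨d, t⟩
      · simp at hpre2
      · obtain ⟨hd, -⟩ := List.cons_prefix_cons.mp hpre2
        exact hne t hc.symm (by rw [← hd])
    · have := ih hinf
      simp only [List.length_cons]; omega
  | case3 => simp at h

-- A's while-loop body strictly shrinks the string, so the loop terminates.
theorem pvReplace_dd_len_lt (cs : List Char) (h : PySem.Chars.isIn ['-','-'] cs = true) :
    (PySem.Chars.replace cs ['-','-'] ['-']).length < cs.length := by
  rw [pvReplace_dd]
  exact pvRep_len_lt cs ((PySem.Chars.isIn_iff_infix _ _).mp h)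

-- while "--" in text: text = text.replace("--", "-")
def pvACollapse (text : List Char) : List Char :=
  if h : PySem.Chars.isIn ['-','-'] text = true then
    pvACollapse (PySem.Chars.replace text ['-','-'] ['-'])
  else text
termination_by text.length
decreasing_by exact pvReplace_dd_len_lt text h

def normalize_global_assistant_guide_module_id_py (raw_value : Option String) (fallback : String) : String :=
  -- text = str(raw_value or "").strip().lower()[:80]  (None and "" are both falsy → "")
  let text0 : List Char :=
    PySem.Chars.slice (PySem.Chars.lower (PySem.Chars.strip (raw_value.getD "").toList)) none (some 80)
  -- five successive text.replace(source, "-") passes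
  let t1 := PySem.Chars.replace text0 [' '] ['-']
  let t2 := PySem.Chars.replace t1 ['/'] ['-']
  let t3 := PySem.Chars.replace t2 ['\\'] ['-']
  let t4 := PySem.Chars.replace t3 ['.'] ['-']
  let t5 := PySem.Chars.replace t4 [':'] ['-']
  -- while "--" in text: …
  let t6 := pvACollapse t5
  -- text = text.strip("-_")
  let t7 := PySem.Chars.stripChars t6 ['-', '_']
  if t7 = [] then fallback else String.ofList t7

-- ===== PORT B =====
-- the single scan of Source B: out is the reversed output list; 'ch in " /\\.:"' is the
-- contains test, 'out and out[-1] == "-"' is out.head? = some '-'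
def pvBScan (out : List Char) : List Char → List Char
  | [] => out.reverse
  | c :: cs =>
    let c' := if ([' ', '/', '\\', '.', ':'].contains c) then '-' else c
    if c' = '-' ∧ out.head? = some '-' then pvBScan out cs else pvBScan (c' :: out) cs

def normalize_global_assistant_guide_module_id_py_alt (raw_value : Option String) (fallback : String) : String :=
  let text : List Char :=
    PySem.Chars.slice (PySem.Chars.lower (PySem.Chars.strip (raw_value.getD "").toList)) none (some 80)
  let result := PySem.Chars.stripChars (pvBScan [] text) ['-', '_']
  if result = [] then fallback else String.ofList result

-- ===== PRECONDITION & SPEC =====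
def Spec_normalize_global_assistant_guide_module_id_py (raw_value : Option String) (fallback : String) (out : String) : Prop := out = normalize_global_assistant_guide_module_id_py_alt raw_value fallback
instance (raw_value : Option String) (fallback : String) (out : String) : Decidable (Spec_normalize_global_assistant_guide_module_id_py raw_value fallback out) := by unfold Spec_normalize_global_assistant_guide_module_id_py; infer_instance

-- ===== CLAIM (what is proved, stated in full; the proofs are below) =====
def Claim_equal_normalize_global_assistant_guide_module_id_py : Prop := ∀ (raw_value : Option String) (fallback : String), Dom_normalize_global_assistant_guide_module_id_py raw_value fallback → Spec_normalize_global_assistant_guide_module_id_py raw_value fallback (normalize_global_assistant_guide_module_id_py raw_value fallback)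

-- ===== LEMMAS AND PROOFS =====

-- the common normal form: collapse every run of '-' to a single '-'
def pvSqueeze : List Char → List Char
  | [] => []
  | c :: cs =>
    if c = '-' then '-' :: pvSqueeze (cs.dropWhile (· = '-')) else c :: pvSqueeze cs
termination_by cs => cs.length
decreasing_by
  · have := List.length_dropWhile_le (fun c => c = '-') cs; simpa using Nat.lt_succ_of_le this
  · simp

theorem pvSqueeze_nil : pvSqueeze [] = [] := by rw [pvSqueeze]

theorem pvSqueeze_dash (cs : List Char) :
    pvSqueeze ('-' :: cs) = '-' :: pvSqueeze (cs.dropWhile (· = '-')) := by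
  rw [pvSqueeze]; simp

theorem pvSqueeze_cons (c : Char) (cs : List Char) (h : c ≠ '-') :
    pvSqueeze (c :: cs) = c :: pvSqueeze cs := by
  rw [pvSqueeze, if_neg h]

-- the character map both programs apply
def pvMapC (c : Char) : Char := if ([' ', '/', '\\', '.', ':'].contains c) then '-' else c

theorem pvReplace_single (cs : List Char) (a : Char) :
    PySem.Chars.replace cs [a] ['-'] = cs.map (fun c => if c = a then '-' else c) := by
  rw [PySem.Chars.replace, if_neg (by simp)]
  suffices h : ∀ fuel l acc, l.length ≤ fuel →
      PySem.Chars.replace.go [a] ['-'] fuel l acc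
        = acc.reverse ++ l.map (fun c => if c = a then '-' else c) by
    simpa using h cs.length cs [] le_rfl
  intro fuel
  induction fuel with
  | zero =>
    intro l acc h
    have : l = [] := by cases l <;> simp_all
    subst this; simp [PySem.Chars.replace.go]
  | succ n ih =>
    intro l acc h
    rcases l with _ | ⟨c, t⟩
    · simp [PySem.Chars.replace.go]
    · rw [PySem.Chars.replace.go]
      by_cases hc : c = a
      · subst hc
        rw [if_pos (by simp [List.isPrefixOf])]
        rw [ih _ _ (by simp at h ⊢; omega)]
        simp
      · rw [if_neg (by simp [List.isPrefixOf]; exact fun hh => hc hh.symm)]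
        rw [ih _ _ (by simp at h ⊢; omega)]
        simp [hc]

theorem pvDropWhile_rep (cs : List Char) :
    (pvRep cs).dropWhile (· = '-') = pvRep (cs.dropWhile (· = '-')) := by
  fun_induction pvRep cs with
  | case1 t ih =>
    simp only [List.dropWhile] at ih ⊢
    simpa using ih
  | case2 c t hne ih =>
    by_cases hc : c = '-'
    · subst hc
      rcases t with _ | ⟨d, t⟩
      · simp [List.dropWhile, pvRep]
      · have hd : d ≠ '-' := fun h => hne t rfl (by rw [h])
        rw [pvRep_cons_ne _ _ hd]
        simp [List.dropWhile, hd]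
        exact (pvRep_cons_ne _ _ hd).symm
    · simp [List.dropWhile, hc]
      exact (pvRep_cons_ne _ _ hc).symm
  | case3 => simp [pvRep]

theorem pvSqueeze_rep (n : Nat) : ∀ cs : List Char, cs.length ≤ n → pvSqueeze (pvRep cs) = pvSqueeze cs := by
  induction n with
  | zero =>
    intro cs h
    have : cs = [] := by cases cs <;> simp_all
    subst this; simp [pvRep]
  | succ n ih =>
    intro cs h
    rcases cs with _ | ⟨c, t⟩
    · simp [pvRep]
    · by_cases hc : c = '-'
      · subst hc
        rcases t with _ | ⟨d, t⟩
        · simp [pvRep]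
        · by_cases hd : d = '-'
          · subst hd
            show pvSqueeze (pvRep ('-' :: '-' :: t)) = _
            rw [show pvRep ('-' :: '-' :: t) = '-' :: pvRep t from rfl]
            rw [pvSqueeze_dash, pvSqueeze_dash]
            rw [pvDropWhile_rep]
            congr 1
            rw [ih _ (le_trans (by simpa using List.length_dropWhile_le (fun c => c = '-') t)
                  (by simp at h; omega))]
            simp [List.dropWhile]
          · rw [pvRep_dash_cons _ _ hd]
            rw [pvSqueeze_dash, pvSqueeze_dash]
            rw [show (List.dropWhile (· = '-') (pvRep (d :: t))) = pvRep (d :: t) by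
              rw [pvRep_cons_ne _ _ hd]; simp [List.dropWhile, hd]]
            rw [show (List.dropWhile (· = '-') (d :: t)) = d :: t by simp [List.dropWhile, hd]]
            congr 1
            exact ih (d :: t) (by simp at h ⊢; omega)
      · rw [pvRep_cons_ne _ _ hc, pvSqueeze_cons _ _ hc, pvSqueeze_cons _ _ hc]
        congr 1
        exact ih t (by simp at h; omega)

theorem pvNoDD_squeeze (n : Nat) : ∀ cs : List Char, cs.length ≤ n → ¬ (['-','-'] <:+: cs) → pvSqueeze cs = cs := by
  induction n with
  | zero =>
    intro cs h _
    have : cs = [] := by cases cs <;> simp_all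
    subst this; exact pvSqueeze_nil
  | succ n ih =>
    intro cs h hno
    rcases cs with _ | ⟨c, t⟩
    · exact pvSqueeze_nil
    · have htail : ¬ (['-','-'] <:+: t) := by
        intro hinf
        obtain ⟨s, u, rfl⟩ := hinf
        exact hno ⟨c :: s, u, by simp⟩
      by_cases hc : c = '-'
      · subst hc
        have hdw : t.dropWhile (· = '-') = t := by
          rcases t with _ | ⟨d, t⟩
          · rfl
          · have hd : d ≠ '-' := by
              intro hd; subst hd
              exact hno ⟨[], t, rfl⟩
            simp [List.dropWhile, hd]
        rw [pvSqueeze_dash, hdw, ih t (by simp at h; omega) htail]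
      · rw [pvSqueeze_cons _ _ hc, ih t (by simp at h; omega) htail]

theorem pvACollapse_eq_squeeze (n : Nat) : ∀ cs : List Char, cs.length ≤ n → pvACollapse cs = pvSqueeze cs := by
  induction n with
  | zero =>
    intro cs h
    have : cs = [] := by cases cs <;> simp_all
    subst this
    rw [pvACollapse, dif_neg (by decide)]
    exact pvSqueeze_nil.symm
  | succ n ih =>
    intro cs h
    rw [pvACollapse]
    by_cases hin : PySem.Chars.isIn ['-','-'] cs = true
    · rw [dif_pos hin, pvReplace_dd]
      have hlt := pvRep_len_lt cs ((PySem.Chars.isIn_iff_infix _ _).mp hin)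
      rw [ih _ (by omega)]
      exact pvSqueeze_rep cs.length cs le_rfl
    · rw [dif_neg hin]
      exact (pvNoDD_squeeze cs.length cs le_rfl
        (fun hinf => hin ((PySem.Chars.isIn_iff_infix _ _).mpr hinf))).symm

-- pure flag-scan over an already-mapped list
def pvFScan : Bool → List Char → List Char
  | _, [] => []
  | b, c :: cs => if c = '-' ∧ b = true then pvFScan true cs else c :: pvFScan (c == '-') cs

theorem pvFScan_cons_ne (b : Bool) (c : Char) (cs : List Char) (h : c ≠ '-') :
    pvFScan b (c :: cs) = c :: pvFScan (c == '-') cs := by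
  rw [pvFScan, if_neg (fun hh => h hh.1)]

theorem pvFScan_false_cons (c : Char) (cs : List Char) :
    pvFScan false (c :: cs) = c :: pvFScan (c == '-') cs := by
  rw [pvFScan, if_neg (by simp)]

theorem pvFScan_true_dash (cs : List Char) : pvFScan true ('-' :: cs) = pvFScan true cs := by
  rw [pvFScan, if_pos ⟨rfl, rfl⟩]

theorem pvBScan_eq_fscan (cs : List Char) : ∀ out : List Char,
    pvBScan out cs = out.reverse ++ pvFScan (out.head? == some '-') (cs.map pvMapC) := by
  induction cs with
  | nil => intro out; simp [pvBScan, pvFScan]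
  | cons c t ih =>
    intro out
    show (if pvMapC c = '-' ∧ out.head? = some '-' then pvBScan out t
          else pvBScan (pvMapC c :: out) t) = _
    simp only [List.map_cons]
    by_cases h1 : pvMapC c = '-'
    · by_cases h2 : out.head? = some '-'
      · rw [if_pos ⟨h1, h2⟩, ih out, h1,
            show (out.head? == some '-') = true by simp [h2], pvFScan_true_dash]
      · rw [if_neg (fun hh => h2 hh.2), ih, h1,
            show (out.head? == some '-') = false by simp [h2], pvFScan_false_cons]
        simp
    · rw [if_neg (fun hh => h1 hh.1), ih, pvFScan_cons_ne _ _ _ h1]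
      simp

theorem pvFScan_true (cs : List Char) : pvFScan true cs = pvFScan false (cs.dropWhile (· = '-')) := by
  induction cs with
  | nil => rfl
  | cons c t ih =>
    by_cases hc : c = '-'
    · subst hc
      rw [pvFScan_true_dash, ih, List.dropWhile_cons_of_pos (by simp)]
    · rw [pvFScan_cons_ne _ _ _ hc, List.dropWhile_cons_of_neg (by simp [hc]), pvFScan_false_cons]

theorem pvFScan_false (n : Nat) : ∀ cs : List Char, cs.length ≤ n → pvFScan false cs = pvSqueeze cs := by
  induction n with
  | zero =>
    intro cs h
    have : cs = [] := by cases cs <;> simp_all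
    subst this
    rw [pvSqueeze_nil]; rfl
  | succ n ih =>
    intro cs h
    rcases cs with _ | ⟨c, t⟩
    · rw [pvSqueeze_nil]; rfl
    · by_cases hc : c = '-'
      · subst hc
        rw [pvFScan_false_cons, show ('-' == '-') = true by simp, pvFScan_true, pvSqueeze_dash]
        congr 1
        exact ih _ (le_trans (by simpa using List.length_dropWhile_le (fun c => c = '-') t)
          (by simp at h; omega))
      · rw [pvFScan_false_cons, show (c == '-') = false by simp [hc], pvSqueeze_cons _ _ hc]
        congr 1
        exact ih t (by simp at h; omega)

-- A's five replace passes equal one map with pvMapC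
theorem pvChain_eq_map (text : List Char) :
    PySem.Chars.replace (PySem.Chars.replace (PySem.Chars.replace (PySem.Chars.replace
      (PySem.Chars.replace text [' '] ['-']) ['/'] ['-']) ['\\'] ['-']) ['.'] ['-']) [':'] ['-']
    = text.map pvMapC := by
  simp only [pvReplace_single, List.map_map]
  apply List.map_congr_left
  intro c _
  simp only [Function.comp, pvMapC]
  by_cases h1 : c = ' ' <;> by_cases h2 : c = '/' <;> by_cases h3 : c = '\\' <;>
    by_cases h4 : c = '.' <;> by_cases h5 : c = ':' <;> simp_all

theorem pvCore (text : List Char) :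
    pvACollapse (PySem.Chars.replace (PySem.Chars.replace (PySem.Chars.replace (PySem.Chars.replace
      (PySem.Chars.replace text [' '] ['-']) ['/'] ['-']) ['\\'] ['-']) ['.'] ['-']) [':'] ['-'])
    = pvBScan [] text := by
  rw [pvChain_eq_map]
  rw [pvACollapse_eq_squeeze (text.map pvMapC).length _ le_rfl]
  rw [pvBScan_eq_fscan]
  simp only [List.reverse_nil, List.head?_nil, List.nil_append]
  rw [show (((none : Option Char) == some '-')) = false by rfl]
  rw [pvFScan_false (text.map pvMapC).length _ le_rfl]

-- ===== VERDICT (by name: the statement is the Claim_ definition above) =====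
theorem normalize_global_assistant_guide_module_id_py_spec : Claim_equal_normalize_global_assistant_guide_module_id_py := by
  intro raw_value fallback _
  unfold Spec_normalize_global_assistant_guide_module_id_py
  simp only [normalize_global_assistant_guide_module_id_py,
    normalize_global_assistant_guide_module_id_py_alt, pvCore]
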